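-- pv_equiv track=rewrite | github.com/MayHyeyeonKim/algorithms | ARRSTR30/SA_defalutdict.py | channelRating
-- ===== SOURCE A (Python) =====
-- from collections import defaultdict
--
-- def channelRating(arr):
--     currxor = 0
--     prev = defaultdict(lambda: 0)
--     res = 0
--     add_queue = [0]  # makes sure subarray is of length 3
--
--     for ind in range(len(arr)):
--         i = arr[ind]
--         currxor = currxor ^ i
--
--         if currxor in prev:
--             res += prev[currxor]
--
--         if ind > 0:
--             prev[add_queue[0]] += 1
--             add_queue.pop(0)
--         add_queue.append(currxor)
--
--     return res
-- ===== SOURCE B (Python) =====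
-- from collections import Counter
--
-- def channelRating(arr):
--     # count ALL subarrays with xor 0 via one prefix-xor counter pass,
--     # then subtract the too-short ones (length 1 and length 2)
--     total = 0
--     x = 0
--     cnt = Counter({0: 1})
--     for v in arr:
--         x ^= v
--         total += cnt[x]
--         cnt[x] += 1
--     zeros = sum(1 for v in arr if v == 0)
--     adj = sum(1 for u, w in zip(arr, arr[1:]) if u == w)
--     return total - zeros - adj
-- ===== Notes on version B (the rewrite author's own statement) =====
-- stated objective: alternative
-- what changed: A counts length->=3 xor-0 subarrays online with a prefix-xor dict whose insertions are delayed through a two-element queue; B instead counts ALL xor-0 subarrays with the standard Counter({0:1}) prefix-xor pass and then subtracts the length-1 (arr[k]==0) and length-2 (arr[k]==arr[k+1]) ones in two separate simple passes.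
import Mathlib
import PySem

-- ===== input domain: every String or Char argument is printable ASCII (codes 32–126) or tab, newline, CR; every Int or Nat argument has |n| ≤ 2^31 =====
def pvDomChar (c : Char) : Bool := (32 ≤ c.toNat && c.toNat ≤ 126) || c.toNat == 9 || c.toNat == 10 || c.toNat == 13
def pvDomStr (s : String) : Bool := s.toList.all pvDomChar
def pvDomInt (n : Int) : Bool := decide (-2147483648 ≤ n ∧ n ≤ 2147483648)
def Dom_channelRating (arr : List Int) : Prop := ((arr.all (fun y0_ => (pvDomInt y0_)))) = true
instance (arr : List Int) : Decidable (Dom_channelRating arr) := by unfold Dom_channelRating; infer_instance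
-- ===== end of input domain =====

-- B replaces A's delayed-insertion (two-element queue) prefix-xor pass by the standard
-- count-all-zero-xor-subarrays counter pass plus two separate short-subarray subtractions
-- (alternative decomposition; same O(n) cost).

-- ===== PORT A =====
def channelRating (arr : List Int) : Int :=
  let st := (PySem.List.enumerate arr).foldl
    (fun (s : Int × PySem.Dict Int Int × Int × List Int) p =>
      let currxor := PySem.Int.bxor s.1 p.2
      let res :=
        match s.2.1.get? currxor with            -- 'if currxor in prev: res += prev[currxor]'
        | some v => s.2.2.1 + v
        | none => s.2.2.1
      let pq :=
        if p.1 > 0 then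
          (s.2.1.insert (s.2.2.2.headD 0) (s.2.1.getD (s.2.2.2.headD 0) 0 + 1),  -- prev[add_queue[0]] += 1
           s.2.2.2.tail)                                                          -- add_queue.pop(0) (queue is never empty)
        else (s.2.1, s.2.2.2)
      (currxor, pq.1, res, pq.2 ++ [currxor]))
    (0, PySem.Dict.empty, 0, ([0] : List Int))
  st.2.2.1

-- ===== PORT B =====
def channelRating_alt (arr : List Int) : Int :=
  let st := arr.foldl
    (fun (s : Int × Int × PySem.Dict Int Int) v =>
      let x := PySem.Int.bxor s.2.1 v
      (s.1 + s.2.2.getD x 0, x, s.2.2.insert x (s.2.2.getD x 0 + 1)))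
    (0, 0, ((PySem.Dict.empty).insert 0 1 : PySem.Dict Int Int))   -- Counter({0: 1})
  let zeros : Int := ((arr.filter (fun v => v == 0)).length : Int)
  let adj : Int :=
    (((List.zip arr (PySem.List.slice arr (some 1) none)).filter (fun p => p.1 == p.2)).length : Int)
  st.1 - zeros - adj

-- ===== PRECONDITION & SPEC =====
def Spec_channelRating (arr : List Int) (out : Int) : Prop := out = channelRating_alt arr
instance (arr : List Int) (out : Int) : Decidable (Spec_channelRating arr out) := by unfold Spec_channelRating; infer_instance

-- ===== CLAIM (what is proved, stated in full; the proofs are below) =====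
def Claim_equal_channelRating : Prop := ∀ (arr : List Int), Dom_channelRating arr → Spec_channelRating arr (channelRating arr)

-- ===== LEMMAS AND PROOFS =====

-- named copies of the two loop bodies (definitionally equal to the lambdas in the ports)
def pvStepA (s : Int × PySem.Dict Int Int × Int × List Int) (p : Int × Int) :
    Int × PySem.Dict Int Int × Int × List Int :=
  let currxor := PySem.Int.bxor s.1 p.2
  let res :=
    match s.2.1.get? currxor with
    | some v => s.2.2.1 + v
    | none => s.2.2.1
  let pq :=
    if p.1 > 0 then
      (s.2.1.insert (s.2.2.2.headD 0) (s.2.1.getD (s.2.2.2.headD 0) 0 + 1), s.2.2.2.tail)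
    else (s.2.1, s.2.2.2)
  (currxor, pq.1, res, pq.2 ++ [currxor])

def pvStepB (s : Int × Int × PySem.Dict Int Int) (v : Int) : Int × Int × PySem.Dict Int Int :=
  let x := PySem.Int.bxor s.2.1 v
  (s.1 + s.2.2.getD x 0, x, s.2.2.insert x (s.2.2.getD x 0 + 1))

theorem pvAport (arr : List Int) :
    channelRating arr
      = ((PySem.List.enumerate arr).foldl pvStepA (0, PySem.Dict.empty, 0, ([0] : List Int))).2.2.1 := rfl

theorem pvBport (arr : List Int) :
    channelRating_alt arr
      = (arr.foldl pvStepB (0, 0, ((PySem.Dict.empty).insert 0 1 : PySem.Dict Int Int))).1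
        - ((arr.filter (fun v => v == 0)).length : Int)
        - (((List.zip arr (PySem.List.slice arr (some 1) none)).filter (fun p => p.1 == p.2)).length : Int) := rfl

-- xor cancellation on Python ints (two's complement)
theorem pvBxorCancel (x a : Int) : PySem.Int.bxor (PySem.Int.bxor x a) a = x := by
  unfold PySem.Int.bxor
  rcases le_or_gt 0 x with hx | hx <;> rcases le_or_gt 0 a with ha | ha
  · simp [hx, ha, Nat.xor_xor_cancel_right, Int.toNat_of_nonneg hx]
  · have h1 : ¬ (0 ≤ -(((x.toNat ^^^ (-a-1).toNat) : Nat) : Int) - 1) := by omega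
    simp only [hx, if_pos, if_neg (by omega : ¬ (0 ≤ a)), if_neg h1]
    have h2 : (-(-(((x.toNat ^^^ (-a-1).toNat) : Nat) : Int) - 1) - 1).toNat
        = x.toNat ^^^ (-a-1).toNat := by omega
    rw [h2, Nat.xor_xor_cancel_right, Int.toNat_of_nonneg hx]
  · have h1 : ¬ (0 ≤ -((((-x-1).toNat ^^^ a.toNat) : Nat) : Int) - 1) := by omega
    simp only [if_neg (by omega : ¬ (0 ≤ x)), if_pos ha, if_neg h1]
    have h2 : (-(-((((-x-1).toNat ^^^ a.toNat) : Nat) : Int) - 1) - 1).toNat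
        = (-x-1).toNat ^^^ a.toNat := by omega
    rw [h2, Nat.xor_xor_cancel_right]
    omega
  · simp only [if_neg (by omega : ¬ (0 ≤ x)), if_neg (by omega : ¬ (0 ≤ a)),
      if_pos (by positivity : (0:Int) ≤ (((-x-1).toNat ^^^ (-a-1).toNat : Nat) : Int))]
    rw [Int.toNat_natCast, Nat.xor_xor_cancel_right]
    omega

theorem pvBxorCancelLeft (x a : Int) : PySem.Int.bxor x (PySem.Int.bxor x a) = a := by
  rw [PySem.Int.bxor_comm x a, PySem.Int.bxor_comm x (PySem.Int.bxor a x), pvBxorCancel]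

theorem pvBxorEqSelf (x a : Int) : PySem.Int.bxor x a = x ↔ a = 0 := by
  constructor
  · intro h
    have := pvBxorCancelLeft x a
    rw [h, PySem.Int.bxor_self] at this
    omega
  · rintro rfl; exact PySem.Int.bxor_zero x

theorem pvBxorEqIff (q b a : Int) :
    PySem.Int.bxor (PySem.Int.bxor q b) a = q ↔ a = b := by
  constructor
  · intro h
    have := pvBxorCancelLeft (PySem.Int.bxor q b) a
    rw [h, PySem.Int.bxor_comm q b, pvBxorCancel] at this
    omega
  · rintro rfl; exact pvBxorCancel q _

-- A's running count: 'seen' is the multiset already in prev, q1 the queued prefix, x the current prefix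
def pvFA (seen : List Int) (q1 x : Int) : List Int → Int
  | [] => 0
  | a :: l => (seen.count (PySem.Int.bxor x a) : Int) + pvFA (q1 :: seen) x (PySem.Int.bxor x a) l

-- B's running count: S is the multiset in the counter (all prefixes so far, incl. x at its head)
def pvFB (S : List Int) (x : Int) : List Int → Int
  | [] => 0
  | a :: l => (S.count (PySem.Int.bxor x a) : Int)
      + pvFB (PySem.Int.bxor x a :: S) (PySem.Int.bxor x a) l

-- number of steps whose new prefix equals the current one (length-1 zero-xor subarrays)
def pvZ (x : Int) : List Int → Int
  | [] => 0
  | a :: l => (if x = PySem.Int.bxor x a then 1 else 0) + pvZ (PySem.Int.bxor x a) l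

-- number of steps whose new prefix equals the queued one (length-2 zero-xor subarrays)
def pvE (q1 x : Int) : List Int → Int
  | [] => 0
  | a :: l => (if q1 = PySem.Int.bxor x a then 1 else 0) + pvE x (PySem.Int.bxor x a) l

theorem pvFB_split (l : List Int) : ∀ (seen : List Int) (q1 x : Int),
    pvFB (x :: q1 :: seen) x l = pvFA seen q1 x l + pvZ x l + pvE q1 x l := by
  induction l with
  | nil => intro seen q1 x; simp [pvFA, pvFB, pvZ, pvE]
  | cons a l ih =>
    intro seen q1 x
    simp only [pvFA, pvFB, pvZ, pvE, List.count_cons, beq_iff_eq]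
    rw [ih (q1 :: seen) x (PySem.Int.bxor x a)]
    split_ifs <;> push_cast <;> ring

theorem pvZ_eq_count (l : List Int) : ∀ (x : Int), pvZ x l = (l.count 0 : Int) := by
  induction l with
  | nil => intro x; simp [pvZ]
  | cons a l ih =>
    intro x
    simp only [pvZ, List.count_cons, beq_iff_eq, ih,
      show (x = PySem.Int.bxor x a) ↔ a = 0 from eq_comm.trans (pvBxorEqSelf x a)]
    split_ifs <;> simp_all <;> push_cast <;> ring

theorem pvE_eq_adj (l : List Int) : ∀ (q1 b : Int),
    pvE q1 (PySem.Int.bxor q1 b) l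
      = (((List.zip (b :: l) l).filter (fun p => p.1 == p.2)).length : Int) := by
  induction l with
  | nil => intro q1 b; simp [pvE]
  | cons a l ih =>
    intro q1 b
    simp only [pvE, List.zip_cons_cons, List.filter_cons,
      show (q1 = PySem.Int.bxor (PySem.Int.bxor q1 b) a) ↔ a = b from
        eq_comm.trans (pvBxorEqIff q1 b a)]
    rw [ih (PySem.Int.bxor q1 b) a]
    by_cases h : a = b
    · rw [if_pos h, if_pos (by simp [h])]
      simp only [List.length_cons]
      push_cast; ring
    · rw [if_neg h, if_neg (by simp; omega)]
      push_cast; ring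

-- B's main loop computes total + pvFB, given the counter represents the multiset S
theorem pvBfold (l : List Int) : ∀ (total x : Int) (cnt : PySem.Dict Int Int) (S : List Int),
    (∀ k, cnt.getD k 0 = (S.count k : Int)) →
    (l.foldl pvStepB (total, x, cnt)).1 = total + pvFB S x l := by
  induction l with
  | nil => intro total x cnt S _; simp [pvFB]
  | cons a l ih =>
    intro total x cnt S hS
    rw [List.foldl_cons]
    show (l.foldl pvStepB (total + cnt.getD (PySem.Int.bxor x a) 0, PySem.Int.bxor x a,
        cnt.insert (PySem.Int.bxor x a) (cnt.getD (PySem.Int.bxor x a) 0 + 1))).1 = _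
    rw [ih _ _ _ (PySem.Int.bxor x a :: S) ?_]
    · rw [hS]; simp only [pvFB]; ring
    · intro k
      by_cases hk : k = PySem.Int.bxor x a
      · subst hk
        rw [PySem.Dict.getD_insert_self, hS, List.count_cons_self]
        push_cast; ring
      · rw [PySem.Dict.getD_insert_of_ne _ _ _ hk, hS,
          List.count_cons_of_ne (by omega)]

-- A's steady-state loop (all remaining indices are positive; the queue is [q1, currxor])
theorem pvAfold (l : List Int) : ∀ (i : Int), 1 ≤ i →
    ∀ (res currxor q1 : Int) (prev : PySem.Dict Int Int) (seen : List Int),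
    (∀ k, prev.get? k = if seen.count k = 0 then none else some ((seen.count k : Nat) : Int)) →
    ((PySem.List.enumerate l i).foldl pvStepA (currxor, prev, res, [q1, currxor])).2.2.1
      = res + pvFA seen q1 currxor l := by
  induction l with
  | nil =>
    intro i _ res currxor q1 prev seen _
    simp [pvFA, PySem.List.enumerate_nil]
  | cons a l ih =>
    intro i hi res currxor q1 prev seen hinv
    rw [PySem.List.enumerate_cons, List.foldl_cons]
    have hres : (match prev.get? (PySem.Int.bxor currxor a) with
        | some v => res + v
        | none => res) = res + (seen.count (PySem.Int.bxor currxor a) : Int) := by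
      rw [hinv]
      by_cases h : seen.count (PySem.Int.bxor currxor a) = 0 <;> simp [h]
    have hstep : pvStepA (currxor, prev, res, [q1, currxor]) (i, a)
        = (PySem.Int.bxor currxor a,
           prev.insert q1 (prev.getD q1 0 + 1),
           res + (seen.count (PySem.Int.bxor currxor a) : Int),
           [currxor, PySem.Int.bxor currxor a]) := by
      show (PySem.Int.bxor currxor a,
            (if i > 0 then (prev.insert q1 (prev.getD q1 0 + 1), [currxor]) else (prev, [q1, currxor])).1,
            (match prev.get? (PySem.Int.bxor currxor a) with
             | some v => res + v
             | none => res),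
            (if i > 0 then (prev.insert q1 (prev.getD q1 0 + 1), [currxor]) else (prev, [q1, currxor])).2
              ++ [PySem.Int.bxor currxor a]) = _
      rw [if_pos (by omega : i > 0), hres]
      rfl
    rw [hstep]
    rw [ih (i + 1) (by omega) _ _ currxor _ (q1 :: seen) ?_]
    · simp only [pvFA]; ring
    · intro k
      by_cases hk : k = q1
      · rw [hk, PySem.Dict.get?_insert_self, List.count_cons_self]
        have hgd : prev.getD q1 0 = (seen.count q1 : Int) := by
          unfold PySem.Dict.getD
          rw [hinv]
          by_cases h : seen.count q1 = 0 <;> simp [h]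
        rw [hgd]
        push_cast
        simp
      · rw [PySem.Dict.get?_insert_of_ne _ _ hk, hinv,
          List.count_cons_of_ne (by omega)]

theorem pvEmptyInv (k : Int) :
    (PySem.Dict.empty : PySem.Dict Int Int).get? k
      = if ([] : List Int).count k = 0 then none
        else some (((([] : List Int).count k : Nat)) : Int) := by
  simp [PySem.Dict.get?, PySem.Dict.empty]

-- ===== VERDICT (by name: the statement is the Claim_ definition above) =====
theorem channelRating_spec : Claim_equal_channelRating := by
  intro arr _
  unfold Spec_channelRating
  rw [pvAport, pvBport]
  cases arr with
  | nil => decide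
  | cons a l =>
    have hz : PySem.Int.bxor 0 a = a := by
      rw [PySem.Int.bxor_comm, PySem.Int.bxor_zero]
    -- peel A's first iteration (index 0: nothing is inserted, the lookup misses)
    rw [show PySem.List.enumerate (a :: l) 0 = (0, a) :: PySem.List.enumerate l 1 from
        PySem.List.enumerate_cons a l 0, List.foldl_cons]
    have hstep0 : pvStepA (0, PySem.Dict.empty, 0, ([0] : List Int)) (0, a)
        = (a, PySem.Dict.empty, 0, [0, a]) := by
      show (PySem.Int.bxor 0 a,
            (if (0:Int) > 0 then _ else ((PySem.Dict.empty : PySem.Dict Int Int), [(0:Int)])).1,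
            (match (PySem.Dict.empty : PySem.Dict Int Int).get? (PySem.Int.bxor 0 a) with
             | some v => (0:Int) + v
             | none => (0:Int)),
            (if (0:Int) > 0 then _ else ((PySem.Dict.empty : PySem.Dict Int Int), [(0:Int)])).2
              ++ [PySem.Int.bxor 0 a]) = _
      rw [if_neg (by omega : ¬ ((0:Int) > 0)), hz]
      rfl
    rw [hstep0, pvAfold l 1 (by omega) 0 a 0 PySem.Dict.empty [] pvEmptyInv]
    -- B's whole loop at once
    rw [pvBfold (a :: l) 0 0 (PySem.Dict.empty.insert 0 1) [0] ?invB]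
    case invB =>
      intro k
      by_cases hk : k = 0
      · subst hk; rw [PySem.Dict.getD_insert_self]; simp
      · rw [PySem.Dict.getD_insert_of_ne _ _ _ hk,
          List.count_cons_of_ne (by omega)]
        simp [PySem.Dict.getD, PySem.Dict.get?, PySem.Dict.empty]
    -- split B's total into A's count plus the two short-subarray corrections
    simp only [pvFB, hz]
    rw [pvFB_split l [] 0 a, pvZ_eq_count]
    have hadj : pvE 0 a l
        = (((List.zip (a :: l) l).filter (fun p => p.1 == p.2)).length : Int) := by
      have h := pvE_eq_adj l 0 a
      rwa [hz] at h
    rw [hadj, PySem.List.slice_from_one, List.tail_cons]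
    rw [show ((a :: l).filter (fun v => v == 0)).length = (a :: l).count 0 from
        List.count_eq_length_filter.symm]
    have hc : (((a :: l).count 0 : Nat) : Int)
        = ((l.count 0 : Nat) : Int) + ((([0] : List Int).count a : Nat) : Int) := by
      rw [List.count_cons]
      by_cases h : a = 0 <;> simp [List.count_singleton, h] <;> omega
    rw [hc]
    ring
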